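-- pv_equiv track=rewrite | github.com/pangdoon/Pangdoon_study | 프로그래머스/부대복귀.py | solution
-- ===== SOURCE A (Python) =====
-- from collections import deque
--
-- def solution(n, roads, sources, destination):
--     # 인접 리스트 생성
--     road_connection = [[] for _ in range(n + 1)]
--     for road in roads:
--         road_connection[road[0]].append(road[1])
--         road_connection[road[1]].append(road[0])
--
--     # 최단 거리 계산을 위한 BFS
--     distances = [-1] * (n + 1)  # 각 도시까지의 최단 거리를 저장하는 리스트
--     distances[destination] = 0  # 목적지까지의 거리는 0
--     queue = deque([destination])
--
--     while queue:
--         current = queue.popleft()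
--         current_distance = distances[current]
--
--         for neighbor in road_connection[current]:
--             if distances[neighbor] == -1:  # 아직 방문하지 않은 도시
--                 distances[neighbor] = current_distance + 1
--                 queue.append(neighbor)
--
--     # sources 리스트에 대해 각 도시의 최단 거리를 구함
--     answer = [distances[source] for source in sources]
--
--     return answer
-- ===== SOURCE B (Python) =====
-- def solution(n, roads, sources, destination):
--     # adjacency list (input prep, as in any solution)
--     adj = [[] for _ in range(n + 1)]
--     for road in roads:
--         adj[road[0]].append(road[1])
--         adj[road[1]].append(road[0])
--
--     # Synchronous dynamic programming (Jacobi-style relaxation), no queue and no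
--     # frontier: run n+1 fixed rounds; in round t a whole new distance array is
--     # computed from the previous one — an unreached vertex becomes reachable at
--     # distance t+1 exactly when some neighbour was already reached.
--     dist = [-1] * (n + 1)
--     dist[destination] = 0
--     for t in range(n + 1):
--         new = []
--         for v in range(n + 1):
--             if dist[v] == -1 and any(dist[u] != -1 for u in adj[v]):
--                 new.append(t + 1)
--             else:
--                 new.append(dist[v])
--         dist = new
--
--     return [dist[s] for s in sources]
-- ===== Notes on version B (the rewrite author's own statement) =====
-- stated objective: alternative
-- what changed: A's deque BFS (queue of discovered nodes, per-node distance reads) is replaced by a queueless synchronous dynamic-programming relaxation: n+1 fixed rounds, each recomputing the whole distance array from the previous one, a vertex becoming reachable at distance t+1 when some neighbour was already reached; correct because with unit weights the round index equals the BFS level.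
import Mathlib
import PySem

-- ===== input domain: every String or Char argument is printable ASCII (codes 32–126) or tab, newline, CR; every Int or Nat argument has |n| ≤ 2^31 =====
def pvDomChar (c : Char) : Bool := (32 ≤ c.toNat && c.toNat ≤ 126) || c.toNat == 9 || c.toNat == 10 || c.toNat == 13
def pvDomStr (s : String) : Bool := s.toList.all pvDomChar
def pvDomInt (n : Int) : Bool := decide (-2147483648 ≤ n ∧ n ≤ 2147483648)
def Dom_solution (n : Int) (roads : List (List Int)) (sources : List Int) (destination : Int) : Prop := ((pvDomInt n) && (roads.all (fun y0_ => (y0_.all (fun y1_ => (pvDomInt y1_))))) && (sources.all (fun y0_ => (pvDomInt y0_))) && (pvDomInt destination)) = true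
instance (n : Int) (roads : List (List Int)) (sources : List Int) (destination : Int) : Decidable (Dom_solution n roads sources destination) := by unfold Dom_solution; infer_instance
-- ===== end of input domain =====

-- B replaces A's deque BFS by a queueless synchronous dynamic-programming relaxation
-- (n+1 fixed rounds, each recomputing the whole distance array from the previous one);
-- objective: alternative (A is O(n+E), B is O(n·(n+E)); B is not claimed faster).

-- Shared Python-list primitives (exact on in-range indices, which Pre_ guarantees):
-- pvGet d i = d[i] (−1 where Python raises IndexError; unreachable under Pre_),
-- pvGetL adj i = adj[i] ([] where Python raises; unreachable under Pre_),
-- pvSet xs i v = "xs[i] = v" (no-op where Python raises; unreachable under Pre_).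
def pvGet (d : List Int) (i : Int) : Int := PySem.List.pyGetD d i (-1)
def pvGetL (adj : List (List Int)) (i : Int) : List Int := PySem.List.pyGetD adj i []
def pvSet {α : Type} (xs : List α) (i : Int) (v : α) : List α := PySem.List.pySetD xs i v

-- ===== PORT A =====
-- road_connection = [[] for _ in range(n+1)]; for road in roads: append both directions
def adjA (n : Int) (roads : List (List Int)) : List (List Int) :=
  roads.foldl
    (fun adj road =>
      let a := PySem.List.pyGetD road 0 0
      let b := PySem.List.pyGetD road 1 0
      let adj1 := pvSet adj a (pvGetL adj a ++ [b])
      pvSet adj1 b (pvGetL adj1 b ++ [a]))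
    (List.replicate (n + 1).toNat [])

-- while queue: current = queue.popleft(); …  (fuel n.toNat+2 is a totality guard only;
-- under Pre_ the queue provably empties within it)
def loopA (adj : List (List Int)) : Nat → List Int → List Int → List Int
  | 0, d, _ => d
  | _ + 1, d, [] => d
  | fuel + 1, d, c :: q =>
      let cd := pvGet d c
      let st := (pvGetL adj c).foldl
        (fun (s : List Int × List Int) nb =>
          if pvGet s.1 nb = -1 then (pvSet s.1 nb (cd + 1), s.2 ++ [nb]) else s)
        (d, q)
      loopA adj fuel st.1 st.2

def solution (n : Int) (roads : List (List Int)) (sources : List Int) (destination : Int) : List Int :=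
  let adj := adjA n roads
  let d0 := pvSet (List.replicate (n + 1).toNat (-1 : Int)) destination 0
  let dfin := loopA adj (n.toNat + 2) d0 [destination]
  sources.map (fun s => pvGet dfin s)

-- ===== PORT B =====
-- adjacency list (input prep, identical in B's Python)
def adjB (n : Int) (roads : List (List Int)) : List (List Int) :=
  roads.foldl
    (fun adj road =>
      let a := PySem.List.pyGetD road 0 0
      let b := PySem.List.pyGetD road 1 0
      let adj1 := pvSet adj a (pvGetL adj a ++ [b])
      pvSet adj1 b (pvGetL adj1 b ++ [a]))
    (List.replicate (n + 1).toNat [])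

-- one synchronous round: new = []; for v in range(n+1): new.append(... from old dist ...)
def roundB (adj : List (List Int)) (n : Int) (d : List Int) (t : Int) : List Int :=
  (PySem.List.pyRange 0 (n + 1) 1).foldl
    (fun new v =>
      new ++ [if (pvGet d v == -1) && (pvGetL adj v).any (fun u => !(pvGet d u == -1))
              then t + 1 else pvGet d v])
    []

-- for t in range(n+1): dist = one synchronous round computed from the previous dist
def solution_alt (n : Int) (roads : List (List Int)) (sources : List Int) (destination : Int) : List Int :=
  let adj := adjB n roads
  let d0 := pvSet (List.replicate (n + 1).toNat (-1 : Int)) destination 0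
  let dfin := (PySem.List.pyRange 0 (n + 1) 1).foldl (fun d t => roundB adj n d t) d0
  sources.map (fun s => pvGet dfin s)

-- ===== PRECONDITION & SPEC =====
-- Pre_ is exactly the set of inputs on which Python A returns normally: n ≥ 0, every road row
-- of length ≥ 2 with both endpoints a valid Python index into the (n+1)-cell tables (negative
-- indices down to -(n+1) wrap and are admitted), destination and every source likewise; on
-- everything else A raises IndexError.
def Pre_solution (n : Int) (roads : List (List Int)) (sources : List Int) (destination : Int) : Prop :=
  0 ≤ n ∧ (-(n + 1) ≤ destination ∧ destination ≤ n) ∧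
  (∀ r ∈ roads, 2 ≤ r.length ∧
    (-(n + 1) ≤ r.getD 0 0 ∧ r.getD 0 0 ≤ n) ∧ (-(n + 1) ≤ r.getD 1 0 ∧ r.getD 1 0 ≤ n)) ∧
  (∀ s ∈ sources, -(n + 1) ≤ s ∧ s ≤ n)
instance (n : Int) (roads : List (List Int)) (sources : List Int) (destination : Int) : Decidable (Pre_solution n roads sources destination) := by unfold Pre_solution; infer_instance
def pvWitness_solution : Int × List (List Int) × List Int × Int := (3, [[1, 2], [2, 3]], [1, 2, 3], 3)

def Spec_solution (n : Int) (roads : List (List Int)) (sources : List Int) (destination : Int) (out : List Int) : Prop := out = solution_alt n roads sources destination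
instance (n : Int) (roads : List (List Int)) (sources : List Int) (destination : Int) (out : List Int) : Decidable (Spec_solution n roads sources destination out) := by unfold Spec_solution; infer_instance

-- ===== CLAIM (what is proved, stated in full; the proofs are below) =====
def Claim_equal_solution : Prop := ∀ (n : Int) (roads : List (List Int)) (sources : List Int) (destination : Int), Dom_solution n roads sources destination → Pre_solution n roads sources destination → Spec_solution n roads sources destination (solution n roads sources destination)

-- ===== LEMMAS AND PROOFS =====

-- proof-side views of A's loop: per-node inner fold, and per-level processing
def pvStep (w : Int) (s : List Int × List Int) (nb : Int) : List Int × List Int :=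
  if pvGet s.1 nb = -1 then (pvSet s.1 nb w, s.2 ++ [nb]) else s
def pvFold (w : Int) (ns : List Int) (s : List Int × List Int) : List Int × List Int :=
  ns.foldl (pvStep w) s
def pvLevel (adj : List (List Int)) (w : Int) (f : List Int) (s : List Int × List Int) :
    List Int × List Int :=
  f.foldl (fun s node => pvFold w (pvGetL adj node) s) s
def countNeg (d : List Int) : Nat := d.countP (fun x => x == -1)
def pvValid (N : Nat) (i : Int) : Prop := -(N : Int) ≤ i ∧ i < (N : Int)
def pvAdjOK (N : Nat) (adj : List (List Int)) : Prop := ∀ l ∈ adj, ∀ x ∈ l, pvValid N x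

-- proof-side level-synchronised view of A's BFS loop
def levelLoop (adj : List (List Int)) : Nat → List Int → List Int → Int → List Int
  | 0, d, _, _ => d
  | fuel + 1, d, frontier, dist =>
      if frontier.isEmpty then d
      else
        let st := pvLevel adj (dist + 1) frontier (d, [])
        levelLoop adj fuel st.1 st.2 (dist + 1)

-- canonical cell of a (possibly negative, wrapping) Python index, and array views
def cellOf (N : Nat) (x : Int) : Nat := (PySem.List.pyIdx? N x).getD 0
def dAt (d : List Int) (k : Nat) : Int := d.getD k (-1)
def nbr (N : Nat) (adj : List (List Int)) (k j : Nat) : Prop :=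
  ∃ y ∈ adj.getD k [], cellOf N y = j
def Mk (N : Nat) (adj : List (List Int)) (f : List Int) (k : Nat) : Prop :=
  ∃ x ∈ f, nbr N adj (cellOf N x) k
def symAdj (N : Nat) (adj : List (List Int)) : Prop := ∀ k j, nbr N adj k j → nbr N adj j k

-- the level invariant tying A's frontier to the distance array
def LInv (N : Nat) (adj : List (List Int)) (t : Int) (d : List Int) (f : List Int) : Prop :=
  d.length = N ∧
  (∀ k, k < N → dAt d k = -1 ∨ (0 ≤ dAt d k ∧ dAt d k ≤ t)) ∧
  (∀ x ∈ f, pvValid N x) ∧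
  (∀ x ∈ f, dAt d (cellOf N x) = t) ∧
  (∀ k, k < N → dAt d k = t → ∃ x ∈ f, cellOf N x = k) ∧
  (∀ k j, k < N → j < N → nbr N adj k j → dAt d k ≠ -1 → dAt d k < t → dAt d j ≠ -1) ∧
  (f ≠ [] → t + countNeg d + f.length ≤ (N : Int))

-- proof-side view of B's round iteration
def iterJ (adj : List (List Int)) (n : Int) : Nat → Int → List Int → List Int
  | 0, _, d => d
  | j + 1, t, d => iterJ adj n j (t + 1) (roundB adj n d t)

-- basic get/set facts (with Python's negative-index wrap)
theorem pvIdx_lt {m : Nat} {i : Int} {k : Nat} (h : PySem.List.pyIdx? m i = some k) : k < m := by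
  unfold PySem.List.pyIdx? at h
  split_ifs at h with h1 h2 h3 <;> simp_all <;> omega

theorem pvIdx_isSome {m : Nat} {i : Int} (h : pvValid m i) :
    ∃ k, PySem.List.pyIdx? m i = some k := by
  unfold PySem.List.pyIdx?
  obtain ⟨h1, h2⟩ := h
  split_ifs <;> simp_all

theorem length_pvSet {α : Type} (xs : List α) (i : Int) (v : α) :
    (pvSet xs i v).length = xs.length := by
  unfold pvSet PySem.List.pySetD PySem.List.pySet?
  cases h : PySem.List.pyIdx? xs.length i <;> simp

theorem pvGet_eq_of_idx (d : List Int) {i : Int} {k : Nat} (h : PySem.List.pyIdx? d.length i = some k) :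
    pvGet d i = d.getD k (-1) := by
  unfold pvGet PySem.List.pyGetD PySem.List.pyGet?
  simp [h, List.getD_eq_getElem?_getD]

theorem pvGet_of_idx_none (d : List Int) {i : Int} (h : PySem.List.pyIdx? d.length i = none) :
    pvGet d i = -1 := by
  unfold pvGet PySem.List.pyGetD PySem.List.pyGet?
  simp [h]

theorem pvSet_eq_of_idx {α : Type} (d : List α) {i : Int} {k : Nat} (v : α)
    (h : PySem.List.pyIdx? d.length i = some k) : pvSet d i v = d.set k v := by
  unfold pvSet PySem.List.pySetD PySem.List.pySet?
  simp [h]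

theorem pvSet_of_idx_none {α : Type} (d : List α) {i : Int} (v : α)
    (h : PySem.List.pyIdx? d.length i = none) : pvSet d i v = d := by
  unfold pvSet PySem.List.pySetD PySem.List.pySet?
  simp [h]

theorem pvGet_pvSet_self (d : List Int) (i v : Int) (h : pvValid d.length i) :
    pvGet (pvSet d i v) i = v := by
  obtain ⟨k, hk⟩ := pvIdx_isSome h
  have hkl := pvIdx_lt hk
  rw [pvSet_eq_of_idx d v hk]
  rw [pvGet_eq_of_idx _ (by simpa using hk)]
  simp [List.getD_eq_getElem?_getD, hkl]

theorem pvGet_pvSet_cases (d : List Int) (i v j : Int) :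
    pvGet (pvSet d i v) j = pvGet d j ∨
    (pvGet (pvSet d i v) j = v ∧ pvGet d j = pvGet d i) := by
  cases hi : PySem.List.pyIdx? d.length i with
  | none => left; rw [pvSet_of_idx_none d v hi]
  | some k =>
    have hkl := pvIdx_lt hi
    rw [pvSet_eq_of_idx d v hi]
    cases hj : PySem.List.pyIdx? d.length j with
    | none =>
      left
      rw [pvGet_of_idx_none d hj, pvGet_of_idx_none]
      simpa using hj
    | some k' =>
      rw [pvGet_eq_of_idx d hj, pvGet_eq_of_idx _ (by simpa using hj)]
      by_cases hkk : k' = k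
      · right
        subst hkk
        constructor
        · simp [List.getD_eq_getElem?_getD, hkl]
        · rw [pvGet_eq_of_idx d hi]
      · left
        simp [List.getD_eq_getElem?_getD, List.getElem?_set_ne (show k ≠ k' from by omega)]

theorem countNeg_pvSet (d : List Int) (i v : Int) (hv : pvValid d.length i)
    (hold : pvGet d i = -1) (hne : v ≠ -1) : countNeg (pvSet d i v) + 1 = countNeg d := by
  obtain ⟨k, hk⟩ := pvIdx_isSome hv
  have hkl := pvIdx_lt hk
  rw [pvSet_eq_of_idx d v hk]
  rw [pvGet_eq_of_idx d hk] at hold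
  unfold countNeg
  rw [List.countP_set hkl]
  have hdk : d[k] = -1 := by
    have := List.getD_eq_getElem d (-1) hkl
    omega
  simp [hdk, hne]
  have : d[k] ∈ d := List.getElem_mem hkl
  have hpos : 0 < d.countP (fun x => x == -1) := by
    apply List.countP_pos_iff.mpr
    exact ⟨d[k], this, by simp [hdk]⟩
  omega

theorem countNeg_replicate (m : Nat) : countNeg (List.replicate m (-1 : Int)) = m := by
  induction m with
  | zero => rfl
  | succ m ihm =>
    unfold countNeg at ihm ⊢
    rw [List.replicate_succ, List.countP_cons]
    simp [ihm]

-- cell-level bridges ------------------------------------------------------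
theorem cellOf_eq {N : Nat} {x : Int} {k : Nat} (h : PySem.List.pyIdx? N x = some k) :
    cellOf N x = k := by unfold cellOf; rw [h]; rfl

theorem cellOf_lt {N : Nat} {x : Int} (h : pvValid N x) : cellOf N x < N := by
  obtain ⟨k, hk⟩ := pvIdx_isSome h
  rw [cellOf_eq hk]; exact pvIdx_lt hk

theorem pvGet_cell {N : Nat} (d : List Int) {x : Int} (hd : d.length = N)
    (hx : pvValid N x) : pvGet d x = dAt d (cellOf N x) := by
  obtain ⟨k, hk⟩ := pvIdx_isSome hx
  rw [cellOf_eq hk]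
  exact pvGet_eq_of_idx d (by rw [hd]; exact hk)

theorem pvSet_cell {α : Type} {N : Nat} (d : List α) {x : Int} (v : α) (hd : d.length = N)
    (hx : pvValid N x) : pvSet d x v = d.set (cellOf N x) v := by
  obtain ⟨k, hk⟩ := pvIdx_isSome hx
  rw [cellOf_eq hk]
  exact pvSet_eq_of_idx d v (by rw [hd]; exact hk)

theorem pyGetD_cell {α : Type} {N : Nat} (xs : List α) {x : Int} (dflt : α)
    (hd : xs.length = N) (hx : pvValid N x) :
    PySem.List.pyGetD xs x dflt = xs.getD (cellOf N x) dflt := by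
  obtain ⟨k, hk⟩ := pvIdx_isSome hx
  rw [cellOf_eq hk]
  unfold PySem.List.pyGetD PySem.List.pyGet?
  rw [hd, hk]
  simp [List.getD_eq_getElem?_getD]

theorem pvGetL_cell {N : Nat} (adj : List (List Int)) {x : Int} (hd : adj.length = N)
    (hx : pvValid N x) : pvGetL adj x = adj.getD (cellOf N x) [] :=
  pyGetD_cell adj [] hd hx

theorem getD_set {α : Type} (xs : List α) (m k : Nat) (v d : α) (hm : m < xs.length) :
    (xs.set m v).getD k d = if k = m then v else xs.getD k d := by
  by_cases hk : k < xs.length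
  · simp only [List.getD_eq_getElem?_getD]
    by_cases hkm : k = m
    · subst hkm; simp [hk]
    · simp [List.getElem?_set_ne (show m ≠ k from fun h => hkm h.symm), hkm]
  · have hne : ¬ k = m := by omega
    simp only [List.getD_eq_getElem?_getD, hne, if_false]
    rw [List.getElem?_eq_none (by rw [List.length_set]; omega), List.getElem?_eq_none (by omega)]

theorem dAt_set (d : List Int) (m k : Nat) (v : Int) (hm : m < d.length) :
    dAt (d.set m v) k = if k = m then v else dAt d k := getD_set d m k v (-1) hm

-- ===== adjacency facts =====
theorem mem_pvGetL {adj : List (List Int)} {i : Int} {x : Int} (h : x ∈ pvGetL adj i) :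
    ∃ l ∈ adj, x ∈ l := by
  unfold pvGetL PySem.List.pyGetD at h
  cases hg : PySem.List.pyGet? adj i with
  | none => rw [hg] at h; simp at h
  | some l =>
    rw [hg] at h
    exact ⟨l, PySem.List.mem_of_pyGet?_eq_some adj hg, h⟩

theorem mem_pvSet {α : Type} {l : α} {xs : List α} {i : Int} {v : α}
    (h : l ∈ pvSet xs i v) : l ∈ xs ∨ l = v := by
  unfold pvSet PySem.List.pySetD PySem.List.pySet? at h
  cases hg : PySem.List.pyIdx? xs.length i with
  | none => rw [hg] at h; simp at h; left; exact h
  | some k =>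
    rw [hg] at h
    simp at h
    exact List.mem_or_eq_of_mem_set h

theorem adjA_ok (n : Int) (roads : List (List Int)) (hn : 0 ≤ n)
    (hroads : ∀ r ∈ roads, 2 ≤ r.length ∧
      (-(n + 1) ≤ r.getD 0 0 ∧ r.getD 0 0 ≤ n) ∧ (-(n + 1) ≤ r.getD 1 0 ∧ r.getD 1 0 ≤ n)) :
    pvAdjOK (n + 1).toNat (adjA n roads) := by
  unfold adjA
  have base : pvAdjOK (n + 1).toNat (List.replicate (n + 1).toNat ([] : List Int)) := by
    intro l hl x hx
    rw [List.eq_of_mem_replicate hl] at hx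
    simp at hx
  revert base
  generalize List.replicate (n + 1).toNat ([] : List Int) = adj0
  induction roads generalizing adj0 with
  | nil => intro h; simpa using h
  | cons r roads ih =>
    intro hok
    simp only [List.foldl_cons]
    apply ih
    · intro r' hr'
      exact hroads r' (by simp [hr'])
    · obtain ⟨hrlen, ⟨ha1, ha2⟩, ⟨hb1, hb2⟩⟩ := hroads r (by simp)
      have hN : ((n + 1).toNat : Int) = n + 1 := by omega
      have hga : PySem.List.pyGetD r 0 0 = r.getD 0 0 := PySem.List.pyGetD_zero r 0
      have hgb : PySem.List.pyGetD r 1 0 = r.getD 1 0 := by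
        rw [PySem.List.pyGetD_ofNat' r 1 0]
      have hva : pvValid (n + 1).toNat (r.getD 0 0) := by unfold pvValid; omega
      have hvb : pvValid (n + 1).toNat (r.getD 1 0) := by unfold pvValid; omega
      intro l hl x hx
      simp only [hga, hgb] at hl
      rcases mem_pvSet hl with hl1 | hl1
      · rcases mem_pvSet hl1 with hl2 | hl2
        · exact hok l hl2 x hx
        · subst hl2
          rcases List.mem_append.mp hx with hx1 | hx1
          · obtain ⟨l', hl', hx'⟩ := mem_pvGetL hx1
            exact hok l' hl' x hx'
          · have : x = r.getD 1 0 := by simpa using hx1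
            subst this; exact hvb
      · subst hl1
        rcases List.mem_append.mp hx with hx1 | hx1
        · obtain ⟨l', hl', hx'⟩ := mem_pvGetL hx1
          rcases mem_pvSet hl' with hl2 | hl2
          · exact hok l' hl2 x hx'
          · subst hl2
            rcases List.mem_append.mp hx' with hx2 | hx2
            · obtain ⟨l'', hl'', hx''⟩ := mem_pvGetL hx2
              exact hok l'' hl'' x hx''
            · have : x = r.getD 1 0 := by simpa using hx2
              subst this; exact hvb
        · have : x = r.getD 0 0 := by simpa using hx1
          subst this; exact hva

theorem foldl_adj_length (roads : List (List Int)) :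
    ∀ (adj0 : List (List Int)),
      (roads.foldl
        (fun adj road =>
          let a := PySem.List.pyGetD road 0 0
          let b := PySem.List.pyGetD road 1 0
          let adj1 := pvSet adj a (pvGetL adj a ++ [b])
          pvSet adj1 b (pvGetL adj1 b ++ [a])) adj0).length = adj0.length := by
  induction roads with
  | nil => intro adj0; rfl
  | cons r roads ih =>
    intro adj0
    simp only [List.foldl_cons]
    rw [ih]
    simp [length_pvSet]

theorem adjA_length (n : Int) (roads : List (List Int)) :
    (adjA n roads).length = (n + 1).toNat := by
  unfold adjA
  rw [foldl_adj_length]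
  simp

theorem nbr_set_append (N : Nat) (adj : List (List Int)) (m : Nat) (ys : List Int)
    (hm : m < adj.length) (k j : Nat) :
    nbr N (adj.set m (adj.getD m [] ++ ys)) k j ↔
      nbr N adj k j ∨ (k = m ∧ ∃ y ∈ ys, cellOf N y = j) := by
  unfold nbr
  rw [getD_set adj m k _ [] hm]
  by_cases hkm : k = m
  · subst hkm
    rw [if_pos rfl]
    constructor
    · rintro ⟨y, hy, hcy⟩
      rcases List.mem_append.mp hy with h | h
      · exact Or.inl ⟨y, h, hcy⟩
      · exact Or.inr ⟨rfl, ⟨y, h, hcy⟩⟩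
    · rintro (⟨y, hy, hcy⟩ | ⟨-, y, hy, hcy⟩)
      · exact ⟨y, List.mem_append.mpr (Or.inl hy), hcy⟩
      · exact ⟨y, List.mem_append.mpr (Or.inr hy), hcy⟩
  · simp [hkm]

theorem adjA_sym (n : Int) (roads : List (List Int)) (hn : 0 ≤ n)
    (hroads : ∀ r ∈ roads, 2 ≤ r.length ∧
      (-(n + 1) ≤ r.getD 0 0 ∧ r.getD 0 0 ≤ n) ∧ (-(n + 1) ≤ r.getD 1 0 ∧ r.getD 1 0 ≤ n)) :
    symAdj (n + 1).toNat (adjA n roads) := by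
  have main : ∀ (rs : List (List Int)),
      (∀ r ∈ rs, 2 ≤ r.length ∧
        (-(n + 1) ≤ r.getD 0 0 ∧ r.getD 0 0 ≤ n) ∧ (-(n + 1) ≤ r.getD 1 0 ∧ r.getD 1 0 ≤ n)) →
      ∀ adj0 : List (List Int), adj0.length = (n + 1).toNat → symAdj (n + 1).toNat adj0 →
      symAdj (n + 1).toNat (rs.foldl
        (fun adj road =>
          let a := PySem.List.pyGetD road 0 0
          let b := PySem.List.pyGetD road 1 0
          let adj1 := pvSet adj a (pvGetL adj a ++ [b])
          pvSet adj1 b (pvGetL adj1 b ++ [a])) adj0) := by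
    intro rs
    induction rs with
    | nil => intro _ adj0 _ hs; exact hs
    | cons r rs ih =>
      intro hrs adj0 hlen0 hsym0
      simp only [List.foldl_cons]
      obtain ⟨hrlen, ⟨ha1, ha2⟩, ⟨hb1, hb2⟩⟩ := hrs r (by simp)
      have hga : PySem.List.pyGetD r 0 0 = r.getD 0 0 := PySem.List.pyGetD_zero r 0
      have hgb : PySem.List.pyGetD r 1 0 = r.getD 1 0 := PySem.List.pyGetD_ofNat' r 1 0
      have hva : pvValid (n + 1).toNat (r.getD 0 0) := by
        unfold pvValid; constructor <;> omega
      have hvb : pvValid (n + 1).toNat (r.getD 1 0) := by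
        unfold pvValid; constructor <;> omega
      have hcaN : cellOf (n + 1).toNat (r.getD 0 0) < (n + 1).toNat := cellOf_lt hva
      have hcbN : cellOf (n + 1).toNat (r.getD 1 0) < (n + 1).toNat := cellOf_lt hvb
      have hlen1 : (adj0.set (cellOf (n + 1).toNat (r.getD 0 0))
          (adj0.getD (cellOf (n + 1).toNat (r.getD 0 0)) [] ++ [r.getD 1 0])).length
          = (n + 1).toNat := by
        rw [List.length_set]; exact hlen0
      have hterm : pvSet
          (pvSet adj0 (PySem.List.pyGetD r 0 0)
            (pvGetL adj0 (PySem.List.pyGetD r 0 0) ++ [PySem.List.pyGetD r 1 0]))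
          (PySem.List.pyGetD r 1 0)
          (pvGetL
              (pvSet adj0 (PySem.List.pyGetD r 0 0)
                (pvGetL adj0 (PySem.List.pyGetD r 0 0) ++ [PySem.List.pyGetD r 1 0]))
              (PySem.List.pyGetD r 1 0) ++
            [PySem.List.pyGetD r 0 0]) =
          (adj0.set (cellOf (n + 1).toNat (r.getD 0 0))
            (adj0.getD (cellOf (n + 1).toNat (r.getD 0 0)) [] ++ [r.getD 1 0])).set
            (cellOf (n + 1).toNat (r.getD 1 0))
            ((adj0.set (cellOf (n + 1).toNat (r.getD 0 0))
              (adj0.getD (cellOf (n + 1).toNat (r.getD 0 0)) [] ++ [r.getD 1 0])).getD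
              (cellOf (n + 1).toNat (r.getD 1 0)) [] ++ [r.getD 0 0]) := by
        simp only [hga, hgb]
        rw [pvGetL_cell adj0 hlen0 hva, pvSet_cell adj0 _ hlen0 hva,
          pvGetL_cell _ hlen1 hvb, pvSet_cell _ _ hlen1 hvb]
      rw [hterm]
      apply ih (fun r' hr' => hrs r' (by simp [hr']))
      · rw [List.length_set]; exact hlen1
      · -- symmetry of the updated adjacency
        have hdec : ∀ k j, nbr (n + 1).toNat
            ((adj0.set (cellOf (n + 1).toNat (r.getD 0 0))
              (adj0.getD (cellOf (n + 1).toNat (r.getD 0 0)) [] ++ [r.getD 1 0])).set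
              (cellOf (n + 1).toNat (r.getD 1 0))
              ((adj0.set (cellOf (n + 1).toNat (r.getD 0 0))
                (adj0.getD (cellOf (n + 1).toNat (r.getD 0 0)) [] ++ [r.getD 1 0])).getD
                (cellOf (n + 1).toNat (r.getD 1 0)) [] ++ [r.getD 0 0])) k j ↔
            ((nbr (n + 1).toNat adj0 k j ∨
              (k = cellOf (n + 1).toNat (r.getD 0 0) ∧ cellOf (n + 1).toNat (r.getD 1 0) = j)) ∨
              (k = cellOf (n + 1).toNat (r.getD 1 0) ∧ cellOf (n + 1).toNat (r.getD 0 0) = j)) := by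
          intro k j
          rw [nbr_set_append (n + 1).toNat _ _ [r.getD 0 0] (by rw [hlen1]; exact hcbN) k j]
          rw [nbr_set_append (n + 1).toNat adj0 _ [r.getD 1 0] (by rw [hlen0]; exact hcaN) k j]
          simp only [List.mem_singleton, exists_eq_left]
        intro k j h
        rw [hdec k j] at h
        rw [hdec j k]
        rcases h with (h | ⟨hk, hj⟩) | ⟨hk, hj⟩
        · exact Or.inl (Or.inl (hsym0 k j h))
        · exact Or.inr ⟨hj.symm, hk.symm⟩
        · exact Or.inl (Or.inr ⟨hj.symm, hk.symm⟩)
  unfold adjA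
  apply main roads hroads
  · simp
  · intro k j h
    obtain ⟨y, hy, -⟩ := h
    rw [List.getD_eq_getElem?_getD] at hy
    rcases lt_or_ge k (n + 1).toNat with hk | hk
    · rw [List.getElem?_replicate_of_lt hk] at hy
      simp at hy
    · rw [List.getElem?_eq_none (by simpa using hk)] at hy
      simp at hy

-- ===== characterisation of one BFS level =====
theorem fold_ind (N : Nat) (w : Int) (hw : w ≠ -1) :
    ∀ (ns : List Int) (cur out : List Int), cur.length = N → (∀ y ∈ ns, pvValid N y) →
    (pvFold w ns (cur, out)).1.length = N ∧
    (∀ k, k < N → dAt cur k = -1 → (∃ y ∈ ns, cellOf N y = k) →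
      dAt (pvFold w ns (cur, out)).1 k = w) ∧
    (∀ k, k < N → ¬(dAt cur k = -1 ∧ (∃ y ∈ ns, cellOf N y = k)) →
      dAt (pvFold w ns (cur, out)).1 k = dAt cur k) ∧
    (∀ y ∈ (pvFold w ns (cur, out)).2, y ∈ out ∨
      (pvValid N y ∧ dAt cur (cellOf N y) = -1 ∧ dAt (pvFold w ns (cur, out)).1 (cellOf N y) = w)) ∧
    (∀ k, k < N → dAt cur k = -1 → (∃ y ∈ ns, cellOf N y = k) →
      ∃ y ∈ (pvFold w ns (cur, out)).2, cellOf N y = k) ∧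
    (∀ y ∈ out, y ∈ (pvFold w ns (cur, out)).2) := by
  intro ns
  induction ns with
  | nil =>
    intro cur out hlen _
    refine ⟨hlen, ?_, ?_, ?_, ?_, ?_⟩
    · rintro k _ _ ⟨y, hy, -⟩; simp at hy
    · intro k _ _; rfl
    · intro y hy; exact Or.inl hy
    · rintro k _ _ ⟨y, hy, -⟩; simp at hy
    · intro y hy; exact hy
  | cons y ns ih =>
    intro cur out hlen hval
    have hvy : pvValid N y := hval y (by simp)
    have hcy : cellOf N y < N := cellOf_lt hvy
    have hvalns : ∀ z ∈ ns, pvValid N z := fun z hz => hval z (by simp [hz])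
    simp only [pvFold, List.foldl_cons]
    by_cases hg : pvGet cur y = -1
    · have hgc : dAt cur (cellOf N y) = -1 := by rwa [pvGet_cell cur hlen hvy] at hg
      have hstep : pvStep w (cur, out) y = (cur.set (cellOf N y) w, out ++ [y]) := by
        unfold pvStep
        rw [if_pos hg]
        rw [pvSet_cell (N := N) cur w hlen hvy]
      rw [hstep]
      have hlen' : (cur.set (cellOf N y) w).length = N := by simp [hlen]
      obtain ⟨ih1, ih2, ih3, ih4, ih5, ih6⟩ := ih (cur.set (cellOf N y) w) (out ++ [y]) hlen' hvalns
      simp only [pvFold] at ih1 ih2 ih3 ih4 ih5 ih6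
      have hcur' : ∀ k, dAt (cur.set (cellOf N y) w) k = if k = cellOf N y then w else dAt cur k :=
        fun k => dAt_set cur (cellOf N y) k w (by rw [hlen]; exact hcy)
      have hPcy : dAt (List.foldl (pvStep w) (cur.set (cellOf N y) w, out ++ [y]) ns).1
          (cellOf N y) = w := by
        rw [ih3 (cellOf N y) hcy]
        · rw [hcur', if_pos rfl]
        · rw [hcur', if_pos rfl]
          intro hcon
          exact hw hcon.1
      refine ⟨ih1, ?_, ?_, ?_, ?_, ?_⟩
      · rintro k hk hk1 ⟨z, hz, hcz⟩
        by_cases hkc : k = cellOf N y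
        · subst hkc; exact hPcy
        · rcases List.mem_cons.mp hz with rfl | hz'
          · exact absurd hcz.symm hkc
          · exact ih2 k hk (by rw [hcur', if_neg hkc]; exact hk1) ⟨z, hz', hcz⟩
      · intro k hk hnk
        by_cases hkc : k = cellOf N y
        · subst hkc
          exact absurd ⟨hgc, y, by simp, rfl⟩ hnk
        · rw [ih3 k hk, hcur', if_neg hkc]
          rw [hcur', if_neg hkc]
          rintro ⟨hk1, z, hz, hcz⟩
          exact hnk ⟨hk1, z, by simp [hz], hcz⟩
      · intro z hz
        rcases ih4 z hz with hzo | ⟨hvz, hz1, hz2⟩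
        · rcases List.mem_append.mp hzo with hzo | hzo
          · exact Or.inl hzo
          · have : z = y := by simpa using hzo
            subst this
            exact Or.inr ⟨hvy, hgc, hPcy⟩
        · rw [hcur'] at hz1
          by_cases hzc : cellOf N z = cellOf N y
          · rw [if_pos hzc] at hz1; exact absurd hz1 hw
          · rw [if_neg hzc] at hz1
            exact Or.inr ⟨hvz, hz1, hz2⟩
      · rintro k hk hk1 ⟨z, hz, hcz⟩
        by_cases hkc : k = cellOf N y
        · subst hkc
          exact ⟨y, ih6 y (by simp), rfl⟩
        · rcases List.mem_cons.mp hz with rfl | hz'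
          · exact absurd hcz.symm hkc
          · exact ih5 k hk (by rw [hcur', if_neg hkc]; exact hk1) ⟨z, hz', hcz⟩
      · intro z hz
        exact ih6 z (by simp [hz])
    · have hgc : dAt cur (cellOf N y) ≠ -1 := by rwa [pvGet_cell cur hlen hvy] at hg
      have hstep : pvStep w (cur, out) y = (cur, out) := by
        unfold pvStep
        rw [if_neg hg]
      rw [hstep]
      obtain ⟨ih1, ih2, ih3, ih4, ih5, ih6⟩ := ih cur out hlen hvalns
      simp only [pvFold] at ih1 ih2 ih3 ih4 ih5 ih6
      refine ⟨ih1, ?_, ?_, ih4, ?_, ih6⟩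
      · rintro k hk hk1 ⟨z, hz, hcz⟩
        rcases List.mem_cons.mp hz with rfl | hz'
        · subst hcz; exact absurd hk1 hgc
        · exact ih2 k hk hk1 ⟨z, hz', hcz⟩
      · intro k hk hnk
        refine ih3 k hk ?_
        rintro ⟨hk1, z, hz, hcz⟩
        exact hnk ⟨hk1, z, by simp [hz], hcz⟩
      · rintro k hk hk1 ⟨z, hz, hcz⟩
        rcases List.mem_cons.mp hz with rfl | hz'
        · subst hcz; exact absurd hk1 hgc
        · exact ih5 k hk hk1 ⟨z, hz', hcz⟩

theorem level_ind (N : Nat) (adj : List (List Int)) (hadj : pvAdjOK N adj)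
    (hlen : adj.length = N) (w : Int) (hw : w ≠ -1) :
    ∀ (f : List Int) (cur out : List Int), cur.length = N → (∀ x ∈ f, pvValid N x) →
    (pvLevel adj w f (cur, out)).1.length = N ∧
    (∀ k, k < N → dAt cur k = -1 → Mk N adj f k → dAt (pvLevel adj w f (cur, out)).1 k = w) ∧
    (∀ k, k < N → ¬(dAt cur k = -1 ∧ Mk N adj f k) →
      dAt (pvLevel adj w f (cur, out)).1 k = dAt cur k) ∧
    (∀ y ∈ (pvLevel adj w f (cur, out)).2, y ∈ out ∨
      (pvValid N y ∧ dAt cur (cellOf N y) = -1 ∧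
        dAt (pvLevel adj w f (cur, out)).1 (cellOf N y) = w)) ∧
    (∀ k, k < N → dAt cur k = -1 → Mk N adj f k →
      ∃ y ∈ (pvLevel adj w f (cur, out)).2, cellOf N y = k) ∧
    (∀ y ∈ out, y ∈ (pvLevel adj w f (cur, out)).2) := by
  intro f
  induction f with
  | nil =>
    intro cur out hlc _
    refine ⟨hlc, ?_, ?_, ?_, ?_, ?_⟩
    · rintro k _ _ ⟨x, hx, -⟩; simp at hx
    · intro k _ _; rfl
    · intro y hy; exact Or.inl hy
    · rintro k _ _ ⟨x, hx, -⟩; simp at hx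
    · intro y hy; exact hy
  | cons x f ih =>
    intro cur out hlc hvf
    have hvx : pvValid N x := hvf x (by simp)
    have hvf' : ∀ z ∈ f, pvValid N z := fun z hz => hvf z (by simp [hz])
    have hns : pvGetL adj x = adj.getD (cellOf N x) [] := pvGetL_cell adj hlen hvx
    have hnsval : ∀ y ∈ pvGetL adj x, pvValid N y := by
      intro y hy
      obtain ⟨l, hl, hyl⟩ := mem_pvGetL hy
      exact hadj l hl y hyl
    simp only [pvLevel, List.foldl_cons]
    obtain ⟨f1, f2, f3, f4, f5, f6⟩ := fold_ind N w hw (pvGetL adj x) cur out hlc hnsval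
    set F := pvFold w (pvGetL adj x) (cur, out) with hF
    obtain ⟨l1, l2, l3, l4, l5, l6⟩ := ih F.1 F.2 f1 hvf'
    have hfold : List.foldl (fun s node => pvFold w (pvGetL adj node) s) F f =
        pvLevel adj w f (F.1, F.2) := by simp [pvLevel]
    rw [hfold]
    have hcond : ∀ k, (∃ y ∈ pvGetL adj x, cellOf N y = k) ↔ nbr N adj (cellOf N x) k := by
      intro k; rw [hns]; rfl
    have hchg : ∀ k, k < N → dAt F.1 k ≠ dAt cur k →
        (dAt cur k = -1 ∧ nbr N adj (cellOf N x) k) := by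
      intro k hk hne
      by_cases hc : dAt cur k = -1 ∧ (∃ y ∈ pvGetL adj x, cellOf N y = k)
      · exact ⟨hc.1, (hcond k).mp hc.2⟩
      · exact absurd (f3 k hk hc) hne
    refine ⟨l1, ?_, ?_, ?_, ?_, ?_⟩
    · rintro k hk hk1 ⟨z, hz, hnz⟩
      rcases List.mem_cons.mp hz with rfl | hz'
      · have hF1 : dAt F.1 k = w := f2 k hk hk1 ((hcond k).mpr hnz)
        rw [l3 k hk (by rw [hF1]; rintro ⟨h, -⟩; exact hw h), hF1]
      · by_cases hb : dAt F.1 k = -1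
        · exact l2 k hk hb ⟨z, hz', hnz⟩
        · by_cases hc : ∃ y ∈ pvGetL adj x, cellOf N y = k
          · have hF1 : dAt F.1 k = w := f2 k hk hk1 hc
            rw [l3 k hk (by rw [hF1]; rintro ⟨h, -⟩; exact hw h), hF1]
          · exact absurd (by rw [f3 k hk (by rintro ⟨-, h⟩; exact hc h)]; exact hk1) hb
    · intro k hk hnk
      have hFk : dAt F.1 k = dAt cur k := by
        by_cases hc : dAt cur k = -1 ∧ (∃ y ∈ pvGetL adj x, cellOf N y = k)
        · exact absurd ⟨hc.1, x, by simp, (hcond k).mp hc.2⟩ hnk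
        · exact f3 k hk hc
      rw [l3 k hk ?_, hFk]
      rintro ⟨hb, z, hz, hnz⟩
      rw [hFk] at hb
      exact hnk ⟨hb, z, by simp [hz], hnz⟩
    · intro y hy
      rcases l4 y hy with hyo | ⟨hvy, hy1, hy2⟩
      · rcases f4 y hyo with hyo' | ⟨hvy, hy1, hy2⟩
        · exact Or.inl hyo'
        · refine Or.inr ⟨hvy, hy1, ?_⟩
          rw [l3 (cellOf N y) (cellOf_lt hvy) (by rw [hy2]; rintro ⟨h, -⟩; exact hw h), hy2]
      · refine Or.inr ⟨hvy, ?_, hy2⟩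
        by_cases hc : dAt cur (cellOf N y) = -1
        · exact hc
        · exact absurd (by rw [f3 (cellOf N y) (cellOf_lt hvy)
            (by rintro ⟨h, -⟩; exact hc h)] at hy1; exact hy1) hc
    · rintro k hk hk1 ⟨z, hz, hnz⟩
      rcases List.mem_cons.mp hz with rfl | hz'
      · obtain ⟨y, hy, hcy⟩ := f5 k hk hk1 ((hcond k).mpr hnz)
        exact ⟨y, l6 y hy, hcy⟩
      · by_cases hb : dAt F.1 k = -1
        · exact l5 k hk hb ⟨z, hz', hnz⟩
        · by_cases hc : ∃ y ∈ pvGetL adj x, cellOf N y = k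
          · obtain ⟨y, hy, hcy⟩ := f5 k hk hk1 hc
            exact ⟨y, l6 y hy, hcy⟩
          · exact absurd (by rw [f3 k hk (by rintro ⟨-, h⟩; exact hc h)]; exact hk1) hb
    · intro y hy
      exact l6 y (f6 y hy)

-- ===== pvLevel bookkeeping (length / counting), reused by the flat-queue reduction =====
theorem pvFold_queue (w : Int) (ns : List Int) (d : List Int) (q1 q2 : List Int) :
    pvFold w ns (d, q1 ++ q2) = ((pvFold w ns (d, q2)).1, q1 ++ (pvFold w ns (d, q2)).2) := by
  induction ns generalizing d q2 with
  | nil => simp [pvFold]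
  | cons nb ns ih =>
    simp only [pvFold, List.foldl_cons]
    by_cases h : pvGet d nb = -1
    · have : pvStep w (d, q1 ++ q2) nb = (pvSet d nb w, q1 ++ (q2 ++ [nb])) := by
        simp [pvStep, h]
      rw [this]
      have h2 : pvStep w (d, q2) nb = (pvSet d nb w, q2 ++ [nb]) := by simp [pvStep, h]
      rw [h2]
      exact ih _ _
    · have : pvStep w (d, q1 ++ q2) nb = (d, q1 ++ q2) := by simp [pvStep, h]
      rw [this]
      have h2 : pvStep w (d, q2) nb = (d, q2) := by simp [pvStep, h]
      rw [h2]
      exact ih _ _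

theorem pvFold_len (w : Int) (ns : List Int) (s : List Int × List Int) :
    (pvFold w ns s).1.length = s.1.length := by
  induction ns generalizing s with
  | nil => simp [pvFold]
  | cons nb ns ih =>
    simp only [pvFold, List.foldl_cons]
    simp only [pvFold] at ih
    rw [ih]
    unfold pvStep
    split_ifs <;> simp [length_pvSet]

theorem pvGet_pvFold_preserve (w : Int) (ns : List Int) (s : List Int × List Int) (j : Int)
    (h : pvGet s.1 j ≠ -1) : pvGet (pvFold w ns s).1 j = pvGet s.1 j := by
  induction ns generalizing s with
  | nil => simp [pvFold]
  | cons nb ns ih =>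
    simp only [pvFold, List.foldl_cons]
    have hstep : pvGet (pvStep w s nb).1 j = pvGet s.1 j := by
      unfold pvStep
      split_ifs with hg
      · simp only
        rcases pvGet_pvSet_cases s.1 nb w j with h' | ⟨h1', h2'⟩
        · exact h'
        · rw [h2'] at h; exact absurd hg h
      · rfl
    have := ih (pvStep w s nb) (by rw [hstep]; exact h)
    simp only [pvFold] at this
    rw [this, hstep]

theorem pvFold_new (w : Int) (ns : List Int) (d q : List Int)
    (hns : ∀ nb ∈ ns, pvValid d.length nb) (hq : ∀ x ∈ q, pvGet d x = w) :
    ∀ x ∈ (pvFold w ns (d, q)).2, pvGet (pvFold w ns (d, q)).1 x = w := by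
  induction ns generalizing d q with
  | nil => simpa [pvFold] using hq
  | cons nb ns ih =>
    simp only [pvFold, List.foldl_cons]
    by_cases hg : pvGet d nb = -1
    · have hst : pvStep w (d, q) nb = (pvSet d nb w, q ++ [nb]) := by simp [pvStep, hg]
      rw [hst]
      apply ih
      · intro x hx
        have := hns x (by simp [hx])
        rwa [length_pvSet]
      · intro x hx
        rcases List.mem_append.mp hx with hx | hx
        · have hxw := hq x hx
          rcases pvGet_pvSet_cases d nb w x with h' | ⟨h1', _⟩
          · rw [h', hxw]
          · rw [h1']
        · have hx : x = nb := by simpa using hx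
          subst hx
          exact pvGet_pvSet_self d x w (hns x (by simp))
    · have hst : pvStep w (d, q) nb = (d, q) := by simp [pvStep, hg]
      rw [hst]
      exact ih d q (fun x hx => hns x (by simp [hx])) hq

theorem pvFold_count (w : Int) (hw : w ≠ -1) (ns : List Int) (d q : List Int)
    (hns : ∀ nb ∈ ns, pvValid d.length nb) :
    countNeg (pvFold w ns (d, q)).1 + (pvFold w ns (d, q)).2.length = countNeg d + q.length := by
  induction ns generalizing d q with
  | nil => simp [pvFold]
  | cons nb ns ih =>
    simp only [pvFold, List.foldl_cons]
    by_cases hg : pvGet d nb = -1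
    · have hst : pvStep w (d, q) nb = (pvSet d nb w, q ++ [nb]) := by simp [pvStep, hg]
      rw [hst]
      have hv := hns nb (by simp)
      have := ih (pvSet d nb w) (q ++ [nb])
        (fun x hx => by rw [length_pvSet]; exact hns x (by simp [hx]))
      simp only [pvFold] at this
      rw [this]
      have := countNeg_pvSet d nb w hv hg hw
      simp
      omega
    · have hst : pvStep w (d, q) nb = (d, q) := by simp [pvStep, hg]
      rw [hst]
      exact ih d q (fun x hx => hns x (by simp [hx]))

theorem pvLevel_len (adj : List (List Int)) (w : Int) (f : List Int) (s : List Int × List Int) :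
    (pvLevel adj w f s).1.length = s.1.length := by
  induction f generalizing s with
  | nil => simp [pvLevel]
  | cons c f ih =>
    simp only [pvLevel, List.foldl_cons]
    simp only [pvLevel] at ih
    rw [ih, pvFold_len]

theorem pvLevel_new (N : Nat) (adj : List (List Int)) (hadj : pvAdjOK N adj) (w : Int)
    (f : List Int) (d q : List Int) (hlen : d.length = N)
    (hq : ∀ x ∈ q, pvGet d x = w) :
    ∀ x ∈ (pvLevel adj w f (d, q)).2, pvGet (pvLevel adj w f (d, q)).1 x = w := by
  induction f generalizing d q with
  | nil => simpa [pvLevel] using hq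
  | cons c f ih =>
    simp only [pvLevel, List.foldl_cons]
    have hns : ∀ nb ∈ pvGetL adj c, pvValid d.length nb := by
      intro nb hnb
      rw [hlen]
      obtain ⟨l, hl, hx⟩ := mem_pvGetL hnb
      exact hadj l hl nb hx
    have h1 := pvFold_new w (pvGetL adj c) d q hns hq
    have h2 : (pvFold w (pvGetL adj c) (d, q)).1.length = N := by rw [pvFold_len]; exact hlen
    have := ih (pvFold w (pvGetL adj c) (d, q)).1 (pvFold w (pvGetL adj c) (d, q)).2 h2 h1
    simpa [pvLevel] using this

theorem pvLevel_count (N : Nat) (adj : List (List Int)) (hadj : pvAdjOK N adj) (w : Int)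
    (hw : w ≠ -1) (f : List Int) (d q : List Int) (hlen : d.length = N) :
    countNeg (pvLevel adj w f (d, q)).1 + (pvLevel adj w f (d, q)).2.length =
      countNeg d + q.length := by
  induction f generalizing d q with
  | nil => simp [pvLevel]
  | cons c f ih =>
    simp only [pvLevel, List.foldl_cons]
    have hns : ∀ nb ∈ pvGetL adj c, pvValid d.length nb := by
      intro nb hnb
      rw [hlen]
      obtain ⟨l, hl, hx⟩ := mem_pvGetL hnb
      exact hadj l hl nb hx
    have h2 : (pvFold w (pvGetL adj c) (d, q)).1.length = N := by rw [pvFold_len]; exact hlen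
    have := ih (pvFold w (pvGetL adj c) (d, q)).1 (pvFold w (pvGetL adj c) (d, q)).2 h2
    simp only [pvLevel] at this ⊢
    rw [this, pvFold_count w hw _ _ _ hns]

-- FLUSH: processing one BFS level through A's queue loop = the level fold -----------
theorem pvFlush (adj : List (List Int)) (dist : Int) (hdist : 0 ≤ dist)
    (f : List Int) (fa : Nat) (d out : List Int)
    (hf : ∀ x ∈ f, pvGet d x = dist) :
    loopA adj (f.length + fa) d (f ++ out) =
      loopA adj fa (pvLevel adj (dist + 1) f (d, out)).1 (pvLevel adj (dist + 1) f (d, out)).2 := by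
  induction f generalizing d out with
  | nil => simp [pvLevel]
  | cons c f ih =>
    have hcd : pvGet d c = dist := hf c (by simp)
    have hstep : loopA adj (f.length + fa + 1) d (c :: (f ++ out)) =
        loopA adj (f.length + fa) (pvFold (dist + 1) (pvGetL adj c) (d, f ++ out)).1
          (pvFold (dist + 1) (pvGetL adj c) (d, f ++ out)).2 := by
      show loopA adj (f.length + fa + 1) d (c :: (f ++ out)) = _
      rw [loopA]
      rw [hcd]
      rfl
    simp only [List.length_cons, List.cons_append]
    have : f.length + 1 + fa = f.length + fa + 1 := by omega
    rw [this, hstep, pvFold_queue]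
    have hf' : ∀ x ∈ f, pvGet (pvFold (dist + 1) (pvGetL adj c) (d, out)).1 x = dist := by
      intro x hx
      rw [pvGet_pvFold_preserve]
      · exact hf x (by simp [hx])
      · rw [hf x (by simp [hx])]; omega
    rw [ih _ _ hf']
    simp [pvLevel]

theorem loopA_nil (adj : List (List Int)) (fa : Nat) (d : List Int) :
    loopA adj fa d [] = d := by cases fa <;> rfl

theorem levelLoop_nil (adj : List (List Int)) (fb : Nat) (d : List Int) (dist : Int) :
    levelLoop adj fb d [] dist = d := by cases fb <;> simp [levelLoop]

-- LEVELS: A's flat queue loop agrees with the level-synchronised view ----------------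
theorem pvLevels (N : Nat) (adj : List (List Int)) (hadj : pvAdjOK N adj) :
    ∀ (fb fa : Nat) (d frontier : List Int) (dist : Int),
      d.length = N → 0 ≤ dist → (∀ x ∈ frontier, pvGet d x = dist) →
      frontier.length + countNeg d ≤ fa → countNeg d + 1 ≤ fb →
      loopA adj fa d frontier = levelLoop adj fb d frontier dist := by
  intro fb
  induction fb with
  | zero => intro fa d frontier dist _ _ _ _ hfb; omega
  | succ fb ih =>
    intro fa d frontier dist hlen hdist hf hfa hfb
    match frontier with
    | [] => rw [loopA_nil, levelLoop_nil]
    | c :: f =>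
      have hw : dist + 1 ≠ -1 := by omega
      set Φ := pvLevel adj (dist + 1) (c :: f) (d, []) with hΦ
      have hflush : loopA adj fa d (c :: f) = loopA adj (fa - (c :: f).length) Φ.1 Φ.2 := by
        have h1 : fa = (c :: f).length + (fa - (c :: f).length) := by
          simp at hfa ⊢; omega
        rw [h1]
        have := pvFlush adj dist hdist (c :: f) (fa - (c :: f).length) d [] hf
        simpa using this
      have hB : levelLoop adj (fb + 1) d (c :: f) dist = levelLoop adj fb Φ.1 Φ.2 (dist + 1) := by
        simp [levelLoop, hΦ]
      rw [hflush, hB]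
      have hΦlen : Φ.1.length = N := by rw [hΦ, pvLevel_len]; exact hlen
      have hΦcount : countNeg Φ.1 + Φ.2.length = countNeg d := by
        have := pvLevel_count N adj hadj (dist + 1) hw (c :: f) d [] hlen
        simpa using this
      match hne : Φ.2 with
      | [] => rw [loopA_nil, levelLoop_nil]
      | x :: xs =>
        have hΦnew : ∀ y ∈ Φ.2, pvGet Φ.1 y = dist + 1 := by
          rw [hΦ]
          exact pvLevel_new N adj hadj (dist + 1) (c :: f) d [] hlen (by simp)
        rw [← hne]
        apply ih
        · exact hΦlen
        · omega
        · exact hΦnew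
        · rw [hne] at hΦcount ⊢
          simp at hΦcount hfa ⊢
          omega
        · rw [hne] at hΦcount
          simp at hΦcount hfb ⊢
          omega

-- ===== B's round agrees with one level =====
theorem roundB_eq_map (adj : List (List Int)) (n : Int) (d : List Int) (t : Int) :
    roundB adj n d t = (PySem.List.pyRange 0 (n + 1) 1).map
      (fun v => if (pvGet d v == -1) && (pvGetL adj v).any (fun u => !(pvGet d u == -1))
                then t + 1 else pvGet d v) := by
  unfold roundB
  rw [PySem.List.foldl_append_singleton_eq_map]
  simp

-- the round, seen cellwise
theorem roundB_cells (N : Nat) (adj : List (List Int)) (n : Int) (hn : 0 ≤ n)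
    (hN : N = (n + 1).toNat) (d : List Int) (hd : d.length = N) (t : Int) :
    (roundB adj n d t).length = N ∧
    (∀ k, k < N → dAt d k = -1 → (∃ u ∈ adj.getD k [], pvGet d u ≠ -1) →
      dAt (roundB adj n d t) k = t + 1) ∧
    (∀ k, k < N → ¬(dAt d k = -1 ∧ (∃ u ∈ adj.getD k [], pvGet d u ≠ -1)) →
      dAt (roundB adj n d t) k = dAt d k) := by
  have h1 : ∀ k : Nat, pvGet d (k : Int) = dAt d k := by
    intro k; unfold pvGet dAt; rw [PySem.List.pyGetD_natCast]
  have h2 : ∀ k : Nat, pvGetL adj (k : Int) = adj.getD k [] := by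
    intro k; unfold pvGetL; rw [PySem.List.pyGetD_natCast]
  have hlenR : (roundB adj n d t).length = N := by
    rw [roundB_eq_map]
    rw [List.length_map, PySem.List.length_pyRange_one]
    omega
  have hentry : ∀ k, k < N →
      dAt (roundB adj n d t) k =
        if (dAt d k == -1) && (adj.getD k []).any (fun u => !(pvGet d u == -1))
        then t + 1 else dAt d k := by
    intro k hk
    rw [roundB_eq_map]
    unfold dAt
    rw [List.getD_eq_getElem?_getD, List.getElem?_map]
    have hkR : k < (PySem.List.pyRange 0 (n + 1) 1).length := by
      rw [PySem.List.length_pyRange_one]; omega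
    rw [List.getElem?_eq_getElem hkR]
    simp only [Option.map_some, Option.getD_some]
    rw [PySem.List.getElem_pyRange_one]
    rw [zero_add, h1, h2]
    rfl
  refine ⟨hlenR, ?_, ?_⟩
  · rintro k hk hk1 ⟨u, hu, hune⟩
    rw [hentry k hk, if_pos]
    rw [Bool.and_eq_true, beq_iff_eq, List.any_eq_true]
    exact ⟨hk1, u, hu, by simp [hune]⟩
  · intro k hk hnk
    rw [hentry k hk, if_neg]
    rw [Bool.and_eq_true, beq_iff_eq, List.any_eq_true]
    rintro ⟨ha, u, hu, hb⟩
    simp only [Bool.not_eq_eq_eq_not, Bool.not_true, beq_eq_false_iff_ne] at hb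
    exact hnk ⟨ha, u, hu, hb⟩

-- STEP: under the invariant, B's synchronous round computes exactly A's next level array
theorem pvStepLemma (N : Nat) (adj : List (List Int)) (n : Int) (hn : 0 ≤ n)
    (hN : N = (n + 1).toNat) (hadj : pvAdjOK N adj) (hlen : adj.length = N)
    (hsym : symAdj N adj) (t : Int) (ht : 0 ≤ t) (d f : List Int)
    (hinv : LInv N adj t d f) :
    roundB adj n d t = (pvLevel adj (t + 1) f (d, [])).1 ∧
    LInv N adj (t + 1) (pvLevel adj (t + 1) f (d, [])).1 (pvLevel adj (t + 1) f (d, [])).2 := by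
  obtain ⟨hi1, hi2, hi3, hi4, hi5, hi6, hi7⟩ := hinv
  have hw : (t + 1 : Int) ≠ -1 := by omega
  obtain ⟨l1, l2, l3, l4, l5, l6⟩ := level_ind N adj hadj hlen (t + 1) hw f d [] hi1 hi3
  obtain ⟨rc1, rc2, rc3⟩ := roundB_cells N adj n hn hN d hi1 t
  have hmem : ∀ k, k < N → adj.getD k [] ∈ adj := by
    intro k hk
    rw [List.getD_eq_getElem _ _ (by omega)]
    exact List.getElem_mem (by omega)
  have hiff : ∀ k, k < N → dAt d k = -1 →
      ((∃ u ∈ adj.getD k [], pvGet d u ≠ -1) ↔ Mk N adj f k) := by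
    intro k hk hk1
    constructor
    · rintro ⟨u, hu, hune⟩
      have hvu : pvValid N u := hadj _ (hmem k hk) u hu
      have hcu : cellOf N u < N := cellOf_lt hvu
      rw [pvGet_cell d hi1 hvu] at hune
      have hnbrk : nbr N adj k (cellOf N u) := ⟨u, hu, rfl⟩
      rcases hi2 (cellOf N u) hcu with hv | ⟨hv0, hvt⟩
      · exact absurd hv hune
      · rcases lt_or_eq_of_le hvt with hlt | heq
        · exact absurd hk1 (hi6 (cellOf N u) k hcu hk (hsym k (cellOf N u) hnbrk) hune hlt)
        · obtain ⟨x, hx, hcx⟩ := hi5 (cellOf N u) hcu heq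
          exact ⟨x, hx, by rw [hcx]; exact hsym k (cellOf N u) hnbrk⟩
    · rintro ⟨x, hx, hnx⟩
      obtain ⟨u, hu, hcu⟩ := hsym (cellOf N x) k hnx
      have hvu : pvValid N u := hadj _ (hmem k hk) u hu
      refine ⟨u, hu, ?_⟩
      rw [pvGet_cell d hi1 hvu, hcu, hi4 x hx]
      omega
  -- part 1: the round equals the level's array
  have hpt : ∀ k, k < N →
      dAt (roundB adj n d t) k = dAt (pvLevel adj (t + 1) f (d, [])).1 k := by
    intro k hk
    by_cases hk1 : dAt d k = -1
    · by_cases hmk : Mk N adj f k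
      · rw [rc2 k hk hk1 ((hiff k hk hk1).mpr hmk), l2 k hk hk1 hmk]
      · rw [rc3 k hk (by rintro ⟨-, hex⟩; exact hmk ((hiff k hk hk1).mp hex)),
          l3 k hk (by rintro ⟨-, hmk'⟩; exact hmk hmk')]
    · rw [rc3 k hk (by rintro ⟨h, -⟩; exact hk1 h),
        l3 k hk (by rintro ⟨h, -⟩; exact hk1 h)]
  have heq1 : roundB adj n d t = (pvLevel adj (t + 1) f (d, [])).1 := by
    apply List.ext_getElem
    · rw [rc1, l1]
    · intro k hk1' hk2'
      have hk : k < N := by omega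
      have := hpt k hk
      unfold dAt at this
      rwa [List.getD_eq_getElem _ _ hk1', List.getD_eq_getElem _ _ hk2'] at this
  refine ⟨heq1, l1, ?_, ?_, ?_, ?_, ?_, ?_⟩
  -- values bounded by t+1
  · intro k hk
    by_cases hc : dAt d k = -1 ∧ Mk N adj f k
    · rw [l2 k hk hc.1 hc.2]
      right; omega
    · rw [l3 k hk hc]
      rcases hi2 k hk with h | h
      · exact Or.inl h
      · right; omega
  -- new frontier entries are valid
  · intro y hy
    rcases l4 y hy with h | ⟨hv, -, -⟩
    · simp at h
    · exact hv
  -- new frontier entries carry value t+1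
  · intro y hy
    rcases l4 y hy with h | ⟨-, -, hval⟩
    · simp at h
    · exact hval
  -- every cell of value t+1 is represented in the new frontier
  · intro k hk hkt
    by_cases hc : dAt d k = -1 ∧ Mk N adj f k
    · exact l5 k hk hc.1 hc.2
    · exfalso
      rw [l3 k hk hc] at hkt
      rcases hi2 k hk with h | h <;> omega
  -- processed property at t+1
  · intro k j hk hj hnbr hne hlt
    by_cases hck : dAt d k = -1 ∧ Mk N adj f k
    · rw [l2 k hk hck.1 hck.2] at hlt
      omega
    · rw [l3 k hk hck] at hne hlt
      by_cases hcj : dAt d j = -1 ∧ Mk N adj f j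
      · rw [l2 j hj hcj.1 hcj.2]
        omega
      · rw [l3 j hj hcj]
        rcases lt_or_eq_of_le (show dAt d k ≤ t by
          rcases hi2 k hk with h | h <;> omega) with hklt | hkeq
        · exact hi6 k j hk hj hnbr hne hklt
        · obtain ⟨x, hx, hcx⟩ := hi5 k hk hkeq
          intro hj1
          exact hcj ⟨hj1, x, hx, by rw [hcx]; exact hnbr⟩
  -- counting
  · intro hne
    match hf : f with
    | [] =>
      simp [pvLevel] at hne
    | c :: f' =>
      have hcnt := pvLevel_count N adj hadj (t + 1) hw (c :: f') d [] hi1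
      simp only [List.length_nil, Nat.add_zero] at hcnt
      have h7 := hi7 (by simp)
      simp only [List.length_cons] at h7
      push_cast at h7 ⊢
      omega

-- rounds are the identity once the frontier is gone
theorem LInv_empty_succ (N : Nat) (adj : List (List Int)) (t : Int) (ht : 0 ≤ t)
    (d : List Int) (hinv : LInv N adj t d []) : LInv N adj (t + 1) d [] := by
  obtain ⟨h1, h2, _, _, h5, h6, _⟩ := hinv
  refine ⟨h1, ?_, by simp, by simp, ?_, ?_, by simp⟩
  · intro k hk
    rcases h2 k hk with h | h
    · exact Or.inl h
    · exact Or.inr ⟨h.1, by omega⟩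
  · intro k hk hkt
    rcases h2 k hk with h | h <;> [omega; skip]
    exfalso; omega
  · intro k j hk hj hnbr hne hlt
    by_cases hkt : dAt d k = t
    · obtain ⟨x, hx, _⟩ := h5 k hk hkt
      simp at hx
    · exact h6 k j hk hj hnbr hne (by omega)

theorem iterJ_id (N : Nat) (adj : List (List Int)) (n : Int) (hn : 0 ≤ n)
    (hN : N = (n + 1).toNat) (hadj : pvAdjOK N adj) (hlen : adj.length = N)
    (hsym : symAdj N adj) :
    ∀ (j : Nat) (t : Int), 0 ≤ t → ∀ d, LInv N adj t d [] → iterJ adj n j t d = d := by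
  intro j
  induction j with
  | zero => intro t ht d hinv; rfl
  | succ j ih =>
    intro t ht d hinv
    have hr := (pvStepLemma N adj n hn hN hadj hlen hsym t ht d [] hinv).1
    simp only [pvLevel, List.foldl_nil] at hr
    show iterJ adj n j (t + 1) (roundB adj n d t) = d
    rw [hr]
    exact ih (t + 1) (by omega) d (LInv_empty_succ N adj t ht d hinv)

-- MAIN: the level-synchronised loop computes exactly B's round iteration
theorem pvMain (N : Nat) (adj : List (List Int)) (n : Int) (hn : 0 ≤ n)
    (hN : N = (n + 1).toNat) (hadj : pvAdjOK N adj) (hlen : adj.length = N)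
    (hsym : symAdj N adj) :
    ∀ (j : Nat) (t : Int) (d f : List Int), 0 ≤ t → LInv N adj t d f →
      (N : Int) ≤ t + j → levelLoop adj (j + 1) d f t = iterJ adj n j t d := by
  intro j
  induction j with
  | zero =>
    intro t d f ht hinv hNt
    match f with
    | [] => rw [levelLoop_nil]; rfl
    | c :: f' =>
      exfalso
      have hcnt := hinv.2.2.2.2.2.2 (by simp)
      simp at hcnt hNt
      omega
  | succ j ih =>
    intro t d f ht hinv hNt
    match f with
    | [] =>
      rw [levelLoop_nil]
      exact (iterJ_id N adj n hn hN hadj hlen hsym (j + 1) t ht d hinv).symm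
    | c :: f' =>
      obtain ⟨hr, hinv'⟩ := pvStepLemma N adj n hn hN hadj hlen hsym t ht d (c :: f') hinv
      have hL : levelLoop adj (j + 1 + 1) d (c :: f') t =
          levelLoop adj (j + 1) (pvLevel adj (t + 1) (c :: f') (d, [])).1
            (pvLevel adj (t + 1) (c :: f') (d, [])).2 (t + 1) := by
        simp [levelLoop]
      rw [hL]
      show _ = iterJ adj n j (t + 1) (roundB adj n d t)
      rw [hr]
      apply ih
      · omega
      · exact hinv'
      · push_cast at hNt ⊢; omega

-- bridge: B's pyRange fold is the round iteration
theorem foldl_pyRange_iterJ (adj : List (List Int)) (n : Int) :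
    ∀ (j : Nat) (t : Int) (d : List Int),
      (PySem.List.pyRange t (t + j) 1).foldl (fun d t => roundB adj n d t) d = iterJ adj n j t d := by
  intro j
  induction j with
  | zero =>
    intro t d
    rw [show t + (0 : Nat) = t by push_cast; ring, PySem.List.pyRange_one_eq_nil (by omega)]
    rfl
  | succ j ih =>
    intro t d
    rw [PySem.List.pyRange_one_cons (by push_cast; omega)]
    simp only [List.foldl_cons]
    have : t + ((j : Int) + 1) = (t + 1) + j := by ring
    push_cast
    rw [this]
    exact ih (t + 1) (roundB adj n d t)

-- ===== VERDICT (by name: the statement is the Claim_ definition above) =====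
theorem solution_spec : Claim_equal_solution := by
  intro n roads sources destination _hdom hpre
  obtain ⟨hn, ⟨hd1, hd2⟩, hroads, _hsources⟩ := hpre
  unfold Spec_solution solution solution_alt
  dsimp only
  have hadjeq : adjB n roads = adjA n roads := rfl
  rw [hadjeq]
  set N := (n + 1).toNat with hNdef
  have hN : ((n + 1).toNat : Int) = n + 1 := by omega
  set adj := adjA n roads with hadj
  have hok : pvAdjOK N adj := adjA_ok n roads hn hroads
  have hlenadj : adj.length = N := adjA_length n roads
  have hsym : symAdj N adj := adjA_sym n roads hn hroads
  set d0 := pvSet (List.replicate N (-1 : Int)) destination 0 with hd0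
  have hlen0 : d0.length = N := by rw [hd0, length_pvSet, List.length_replicate]
  have hvd : pvValid N destination := by unfold pvValid; omega
  have hvd' : pvValid (List.replicate N (-1 : Int)).length destination := by
    rw [List.length_replicate]; exact hvd
  have hget0 : pvGet d0 destination = 0 := pvGet_pvSet_self _ destination 0 hvd'
  have hcd : cellOf N destination < N := cellOf_lt hvd
  have hd0cells : ∀ k, k < N → dAt d0 k = if k = cellOf N destination then 0 else -1 := by
    intro k hk
    rw [hd0, pvSet_cell (N := N) _ 0 (by simp) hvd,
      dAt_set _ _ _ _ (by simp; exact hcd)]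
    split_ifs with h
    · rfl
    · unfold dAt; rw [List.getD_eq_getElem?_getD]; simp [hk]
  have hcount : countNeg d0 + 1 = N := by
    have := countNeg_pvSet (List.replicate N (-1 : Int)) destination 0 hvd' (by
      unfold pvGet
      rw [pyGetD_cell (N := N) _ _ (by simp) hvd]
      simp [List.getD_eq_getElem?_getD, hcd]) (by omega)
    rw [← hd0] at this
    rw [this, countNeg_replicate]
  have hinv0 : LInv N adj 0 d0 [destination] := by
    refine ⟨hlen0, ?_, ?_, ?_, ?_, ?_, ?_⟩
    · intro k hk
      rw [hd0cells k hk]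
      split_ifs <;> simp
    · intro x hx
      have : x = destination := by simpa using hx
      subst this; exact hvd
    · intro x hx
      have : x = destination := by simpa using hx
      subst this
      rw [hd0cells _ hcd]
      simp
    · intro k hk hk0
      rw [hd0cells k hk] at hk0
      by_cases h : k = cellOf N destination
      · exact ⟨destination, by simp, h.symm⟩
      · rw [if_neg h] at hk0; omega
    · intro k j hk hj hnbr hne hlt
      rw [hd0cells k hk] at hne hlt
      split_ifs at hne hlt <;> omega
    · intro _
      simp
      omega
  have hloops : loopA adj (n.toNat + 2) d0 [destination] =
      levelLoop adj (n.toNat + 2) d0 [destination] 0 := by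
    apply pvLevels N adj hok
    · exact hlen0
    · omega
    · intro x hx
      have : x = destination := by simpa using hx
      subst this; exact hget0
    · simp; omega
    · omega
  have hNn : N = n.toNat + 1 := by omega
  have hmain : levelLoop adj (n.toNat + 2) d0 [destination] 0 =
      iterJ adj n (n.toNat + 1) 0 d0 := by
    have := pvMain N adj n hn rfl hok hlenadj hsym (n.toNat + 1) 0 d0 [destination]
      (by omega) hinv0 (by push_cast; omega)
    simpa using this
  have hbridge : (PySem.List.pyRange 0 (n + 1) 1).foldl (fun d t => roundB adj n d t) d0 =
      iterJ adj n (n.toNat + 1) 0 d0 := by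
    have := foldl_pyRange_iterJ adj n (n.toNat + 1) 0 d0
    rw [show (0 : Int) + ((n.toNat + 1 : Nat) : Int) = n + 1 by push_cast; omega] at this
    exact this
  rw [hloops, hmain, ← hbridge]
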